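-- pv_equiv track=rewrite | github.com/rohitjamwal62/Joshua | GoogleSheet.py | Filtered_records
-- ===== SOURCE A (Python) =====
-- def Filtered_records(string_lower):
--     lines = string_lower.split('\n')
--     pair = None
--     entry = None
--     for line in lines:
--         if line.startswith('pair:'):
--             pair = line
--         elif line.startswith('entry:'):
--             entry = line
--     data = [pair,entry]
--     return data
-- ===== SOURCE B (Python) =====
-- def Filtered_records(string_lower):
--     lines = string_lower.split('\n')
--     pair = next((l for l in reversed(lines) if l.startswith('pair:')), None)
--     entry = next((l for l in reversed(lines) if l.startswith('entry:')), None)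
--     return [pair, entry]
-- ===== Notes on version B (the rewrite author's own statement) =====
-- stated objective: alternative
-- what changed: Replaces the single forward accumulate-the-last-match loop over all lines with two independent reverse scans that each stop at the first matching line.
import Mathlib
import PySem

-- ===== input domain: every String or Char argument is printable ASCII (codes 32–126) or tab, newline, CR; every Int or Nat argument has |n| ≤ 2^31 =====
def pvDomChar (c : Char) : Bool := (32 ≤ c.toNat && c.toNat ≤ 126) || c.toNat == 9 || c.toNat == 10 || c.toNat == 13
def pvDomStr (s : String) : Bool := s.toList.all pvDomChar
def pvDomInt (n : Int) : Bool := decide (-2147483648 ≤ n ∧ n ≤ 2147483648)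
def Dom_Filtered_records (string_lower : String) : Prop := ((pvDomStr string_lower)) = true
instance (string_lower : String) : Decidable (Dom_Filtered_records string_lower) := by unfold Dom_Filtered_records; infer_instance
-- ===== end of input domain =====

-- B replaces A's single forward last-match loop by two independent reverse first-match scans (alternative decomposition, same cost).

-- ===== PORT A =====
-- A's forward loop: one pass keeping the latest 'pair:' and 'entry:' lines seen so far.
def pvALoop (st : Option String × Option String) (line : String) : Option String × Option String :=
  if PySem.Str.startswith line "pair:" then (some line, st.2)
  else if PySem.Str.startswith line "entry:" then (st.1, some line)
  else st

def Filtered_records (string_lower : String) : List (Option String) :=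
  let lines := (PySem.Str.split? string_lower "\n").getD []
  let st := lines.foldl pvALoop (none, none)
  [st.1, st.2]

-- ===== PORT B =====
def Filtered_records_alt (string_lower : String) : List (Option String) :=
  let lines := (PySem.Str.split? string_lower "\n").getD []
  let pair := lines.reverse.find? (fun l => PySem.Str.startswith l "pair:")
  let entry := lines.reverse.find? (fun l => PySem.Str.startswith l "entry:")
  [pair, entry]

-- ===== PRECONDITION & SPEC =====
def Spec_Filtered_records (string_lower : String) (out : List (Option String)) : Prop := out = Filtered_records_alt string_lower
instance (string_lower : String) (out : List (Option String)) : Decidable (Spec_Filtered_records string_lower out) := by unfold Spec_Filtered_records; infer_instance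

-- ===== CLAIM (what is proved, stated in full; the proofs are below) =====
def Claim_equal_Filtered_records : Prop := ∀ (string_lower : String), Dom_Filtered_records string_lower → Spec_Filtered_records string_lower (Filtered_records string_lower)

-- ===== LEMMAS AND PROOFS =====

-- No line starts with both "pair:" and "entry:" (first characters differ).
theorem pv_excl (l : List Char) (h : PySem.Chars.startswith l ['p','a','i','r',':'] = true) :
    PySem.Chars.startswith l ['e','n','t','r','y',':'] = false := by
  by_contra hc
  rw [Bool.not_eq_false, PySem.Chars.startswith_iff] at hc
  rw [PySem.Chars.startswith_iff] at h
  obtain ⟨t1, h1⟩ := h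
  obtain ⟨t2, h2⟩ := hc
  rw [← h2] at h1
  simp at h1

theorem pv_loop_eq (lines : List String) (p e : Option String) :
    lines.foldl pvALoop (p, e) =
      ((lines.reverse.find? (fun l => PySem.Str.startswith l "pair:")).or p,
       (lines.reverse.find? (fun l => PySem.Str.startswith l "entry:")).or e) := by
  induction lines generalizing p e with
  | nil => simp
  | cons x l ih =>
    simp only [List.foldl_cons, List.reverse_cons, List.find?_append, ih, pvALoop,
      PySem.Str.startswith_eq]
    by_cases h1 : PySem.Chars.startswith x.toList ['p','a','i','r',':'] = true
    · have h2 := pv_excl x.toList h1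
      simp [h1, h2]
    · by_cases h2 : PySem.Chars.startswith x.toList ['e','n','t','r','y',':'] = true
      · simp [h1, h2]
      · simp [h1, h2]

-- ===== VERDICT (by name: the statement is the Claim_ definition above) =====
theorem Filtered_records_spec : Claim_equal_Filtered_records := by
  intro s _
  simp only [Spec_Filtered_records, Filtered_records, Filtered_records_alt, pv_loop_eq,
    Option.or_none]
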